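-- pv_equiv track=rewrite | github.com/aminpepezethun/number_translation | numberTranslation.py | blockify
-- ===== SOURCE A (Python) =====
-- def blockify(number:str):
--     n = len(number)
--     remainder = n % 3
--     block_size = 3 if remainder == 0 else remainder
--
--     blocks = []
--     count = 0
--     while count != n:
--         num = number[count:count+block_size]
--         blocks.append(num)
--         count += block_size
--         block_size = 3
--
--     blocks.reverse()
--
--     return blocks, len(blocks)
-- ===== SOURCE B (Python) =====
-- def blockify(number: str):
--     blocks = []
--     i = len(number)
--     while i > 0:
--         blocks.append(number[max(0, i - 3):i])
--         i -= 3
--     return blocks, len(blocks)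
-- ===== Notes on version B (the rewrite author's own statement) =====
-- stated objective: simpler
-- what changed: B walks the string right-to-left with a single index loop slicing number[max(0,i-3):i], producing blocks directly in final order, instead of A's remainder/first-block-size computation, left-to-right build and final reverse.
import Mathlib
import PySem

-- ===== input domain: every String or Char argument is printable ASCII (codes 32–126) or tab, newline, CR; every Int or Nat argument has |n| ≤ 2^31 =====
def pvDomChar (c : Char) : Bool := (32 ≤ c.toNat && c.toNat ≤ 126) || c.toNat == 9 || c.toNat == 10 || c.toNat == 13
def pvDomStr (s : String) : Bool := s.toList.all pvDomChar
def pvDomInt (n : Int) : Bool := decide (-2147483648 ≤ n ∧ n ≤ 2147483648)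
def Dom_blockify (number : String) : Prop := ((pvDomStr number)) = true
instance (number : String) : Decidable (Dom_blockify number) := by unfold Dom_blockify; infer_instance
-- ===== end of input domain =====

-- B replaces A's remainder/first-block-size computation, left-to-right build and final
-- reverse by a single right-to-left index walk that slices blocks directly in final order.

-- ===== PORT A =====
-- the while loop of A; fuel = n suffices since count strictly increases each iteration
def blockifyLoopA (cs : List Char) (n : Int) : Int → Int → List String → Nat → List String
  | _, _, blocks, 0 => blocks
  | count, bs, blocks, fuel + 1 =>
    if count = n then blocks
    else blockifyLoopA cs n (count + bs) 3
      (blocks ++ [String.ofList (PySem.List.slice cs (some count) (some (count + bs)))]) fuel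

def blockify (number : String) : List String × Int :=
  let cs := number.toList
  let n : Int := PySem.Str.len number
  let remainder := PySem.Int.mod n 3
  let block_size : Int := if remainder = 0 then 3 else remainder
  let blocks := (blockifyLoopA cs n 0 block_size [] n.toNat).reverse
  (blocks, (blocks.length : Int))

-- ===== PORT B =====
-- the while loop of B: i walks n, n-3, … down to ≤ 0, appending number[max(0,i-3):i]
def blockifyLoopB (cs : List Char) (i : Int) (acc : List String) : List String :=
  if 0 < i then
    blockifyLoopB cs (i - 3)
      (acc ++ [String.ofList (PySem.List.slice cs (some (max 0 (i - 3))) (some i))])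
  else acc
termination_by i.toNat
decreasing_by omega

def blockify_alt (number : String) : List String × Int :=
  let cs := number.toList
  let blocks := blockifyLoopB cs (PySem.Str.len number) []
  (blocks, (blocks.length : Int))

-- ===== PRECONDITION & SPEC =====
def Spec_blockify (number : String) (out : List String × Int) : Prop := out = blockify_alt number
instance (number : String) (out : List String × Int) : Decidable (Spec_blockify number out) := by unfold Spec_blockify; infer_instance

-- ===== CLAIM (what is proved, stated in full; the proofs are below) =====
def Claim_equal_blockify : Prop := ∀ (number : String), Dom_blockify number → Spec_blockify number (blockify number)

-- ===== LEMMAS AND PROOFS =====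

-- right-to-left block list of cs[0:m], rightmost block first (what B's loop produces)
def chunksR (cs : List Char) (m : Nat) : List String :=
  if 0 < m then String.ofList ((cs.drop (m - 3)).take (m - (m - 3))) :: chunksR cs (m - 3) else []
termination_by m
decreasing_by omega

-- left-to-right list of k 3-blocks starting at position c (A's loop after the first block)
def chunksL (cs : List Char) (c : Nat) : Nat → List String
  | 0 => []
  | k + 1 => String.ofList ((cs.drop c).take 3) :: chunksL cs (c + 3) k

lemma bLoop_spec (cs : List Char) : ∀ (m : Nat) (acc : List String),
    blockifyLoopB cs (m : Int) acc = acc ++ chunksR cs m := by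
  intro m
  induction m using Nat.strong_induction_on with
  | _ m ih =>
    intro acc
    rw [blockifyLoopB, chunksR]
    by_cases h : 0 < m
    · rw [if_pos (show (0 : Int) < m by exact_mod_cast h), if_pos h]
      have hslice : PySem.List.slice cs (some (max 0 ((m : Int) - 3))) (some (m : Int))
          = (cs.drop (m - 3)).take (m - (m - 3)) := by
        rw [show max (0 : Int) ((m : Int) - 3) = ((m - 3 : Nat) : Int) by omega,
          PySem.List.slice_natCast]
      rw [hslice]
      by_cases h3 : 3 ≤ m
      · rw [show (m : Int) - 3 = ((m - 3 : Nat) : Int) by omega, ih (m - 3) (by omega)]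
        simp
      · have e1 : ∀ X, blockifyLoopB cs ((m : Int) - 3) X = X := by
          intro X; rw [blockifyLoopB, if_neg (by omega)]
        have e2 : chunksR cs (m - 3) = [] := by
          rw [show m - 3 = 0 by omega, chunksR]; simp
        rw [e1, e2]
    · rw [if_neg (show ¬ (0 : Int) < m by exact_mod_cast h), if_neg h]; simp

lemma aLoop_spec (cs : List Char) : ∀ (k c : Nat) (acc : List String) (fuel : Nat),
    k ≤ fuel →
    blockifyLoopA cs ((c : Int) + 3 * (k : Int)) (c : Int) 3 acc fuel = acc ++ chunksL cs c k := by
  intro k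
  induction k with
  | zero =>
    intro c acc fuel _
    cases fuel with
    | zero => simp [blockifyLoopA, chunksL]
    | succ f => simp [blockifyLoopA, chunksL]
  | succ k ih =>
    intro c acc fuel hf
    cases fuel with
    | zero => omega
    | succ f =>
      rw [blockifyLoopA, if_neg (by push_cast; omega)]
      have hslice : PySem.List.slice cs (some (c : Int)) (some ((c : Int) + 3))
          = (cs.drop c).take 3 := by
        rw [show ((c : Int) + 3) = ((c + 3 : Nat) : Int) by push_cast; ring,
          PySem.List.slice_natCast, show c + 3 - c = 3 from by omega]
      rw [hslice,
        show ((c : Int) + 3 * (((k + 1 : Nat)) : Int)) = ((c + 3 : Nat) : Int) + 3 * (k : Int)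
          by push_cast; ring,
        show ((c : Int) + 3) = ((c + 3 : Nat) : Int) by push_cast; ring,
        ih (c + 3) _ f (by omega)]
      simp [chunksL]

-- the last block of chunksL
lemma chunksL_snoc (cs : List Char) : ∀ (k c : Nat),
    chunksL cs c (k + 1) = chunksL cs c k ++ [String.ofList ((cs.drop (c + 3 * k)).take 3)] := by
  intro k
  induction k with
  | zero => intro c; simp [chunksL]
  | succ k ih =>
    intro c
    rw [show c + 3 * (k + 1) = (c + 3) + 3 * k by omega, chunksL, ih (c + 3), chunksL]
    simp

-- chunksR is the reverse of A's (first-block :: 3-blocks) decomposition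
lemma chunksR_eq (cs : List Char) : ∀ (k b : Nat), 0 < b → b ≤ 3 →
    chunksR cs (b + 3 * k) = (chunksL cs b k).reverse ++ [String.ofList (cs.take b)] := by
  intro k
  induction k with
  | zero =>
    intro b hb hb3
    rw [show b + 3 * 0 = b by omega, chunksR, if_pos hb, show b - 3 = 0 by omega,
      chunksR, if_neg (by omega)]
    simp [chunksL]
  | succ k ih =>
    intro b hb hb3
    rw [chunksR, if_pos (by omega)]
    rw [show b + 3 * (k + 1) - 3 = b + 3 * k by omega]
    rw [ih b hb hb3, chunksL_snoc,
      show b + 3 * (k + 1) - (b + 3 * k) = 3 by omega]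
    simp

-- ===== VERDICT (by name: the statement is the Claim_ definition above) =====
theorem blockify_spec : Claim_equal_blockify := by
  intro number _
  have hlen : PySem.Str.len number = (number.toList.length : Int) := PySem.Str.len_eq number
  unfold Spec_blockify blockify blockify_alt
  dsimp only
  rw [hlen]
  set cs := number.toList with hcs
  set m := cs.length with hm
  by_cases h0 : m = 0
  · rw [h0]
    simp only [Nat.cast_zero, Int.toNat_zero]
    rw [blockifyLoopB, if_neg (show ¬ (0 : Int) < 0 by omega)]
    simp [blockifyLoopA]
  · have hmpos : 0 < m := Nat.pos_of_ne_zero h0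
    have hmod : PySem.Int.mod (m : Int) 3 = ((m % 3 : Nat) : Int) := by
      exact_mod_cast PySem.Int.mod_natCast m 3
    set b : Nat := if m % 3 = 0 then 3 else m % 3 with hb
    have hbdef : (m % 3 = 0 ∧ b = 3) ∨ (m % 3 ≠ 0 ∧ b = m % 3) := by
      rw [hb]; by_cases h : m % 3 = 0 <;> simp [h]
    have hbpos : 0 < b := by rcases hbdef with ⟨h1, h2⟩ | ⟨h1, h2⟩ <;> omega
    have hb3 : b ≤ 3 := by rcases hbdef with ⟨h1, h2⟩ | ⟨h1, h2⟩ <;> omega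
    have hbInt : (if PySem.Int.mod (m : Int) 3 = 0 then (3 : Int) else PySem.Int.mod (m : Int) 3)
        = (b : Int) := by
      rw [hmod]
      rcases hbdef with ⟨h1, h2⟩ | ⟨h1, h2⟩
      · simp [h1, h2]
      · rw [if_neg (by omega), h2]
    rw [hbInt]
    set k : Nat := (m - b) / 3 with hk
    have hmk : m = b + 3 * k := by
      rw [hk]; rcases hbdef with ⟨h1, h2⟩ | ⟨h1, h2⟩ <;> omega
    have hfuel : (m : Int).toNat = (m - 1) + 1 := by omega
    rw [hfuel, blockifyLoopA, if_neg (show ¬ (0 : Int) = (m : Int) by omega), zero_add]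
    have hslice0 : PySem.List.slice cs (some (0 : Int)) (some ((b : Nat) : Int))
        = cs.take b := by
      rw [show (some (0 : Int)) = some (((0 : Nat) : Nat) : Int) by norm_num,
        PySem.List.slice_natCast]
      simp
    rw [hslice0]
    rw [show (m : Int) = ((b : Nat) : Int) + 3 * ((k : Nat) : Int) by
      rw [hmk]; push_cast; ring]
    rw [aLoop_spec cs k b _ (m - 1) (by omega)]
    rw [show ((b : Int) + 3 * (k : Int)) = ((b + 3 * k : Nat) : Int) by push_cast; ring]
    rw [bLoop_spec cs (b + 3 * k) []]
    rw [chunksR_eq cs k b hbpos hb3]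
    simp
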